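-- pv_equiv track=rewrite | github.com/PreferredAI/mrg | reader.py | get_review_data
-- ===== SOURCE A (Python) =====
-- def get_review_data(users, items, ratings, review_data):
--   new_users = []
--   new_items = []
--   new_ratings = []
--   new_photos = []
--   new_reviews = []
--
--   for user, item, rating in zip(users, items, ratings):
--     for photo_id, reviews in review_data[(user, item)]:
--       new_users.append(user)
--       new_items.append(item)
--       new_ratings.append(rating)
--       new_photos.append(photo_id)
--       new_reviews.append(reviews)
--
--   return new_users, new_items, new_ratings, new_photos, new_reviews
-- ===== SOURCE B (Python) =====
-- def get_review_data(users, items, ratings, review_data):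
--   def solve(ts):
--     if not ts:
--       return [], [], [], [], []
--     if len(ts) == 1:
--       u, i, r = ts[0]
--       block = review_data[(u, i)]
--       k = len(block)
--       return ([u] * k, [i] * k, [r] * k,
--               [p for p, _ in block], [v for _, v in block])
--     mid = len(ts) // 2
--     a = solve(ts[:mid])
--     b = solve(ts[mid:])
--     return tuple(x + y for x, y in zip(a, b))
--   return solve(list(zip(users, items, ratings)))
-- ===== Notes on version B (the rewrite author's own statement) =====
-- stated objective: alternative
-- what changed: B replaces A's iterative one-pass with five parallel appends by a divide-and-conquer recursion: split the zipped triples in half, solve each half, and concatenate the five column lists; single triples expand their review block via list replication.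
import Mathlib
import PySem

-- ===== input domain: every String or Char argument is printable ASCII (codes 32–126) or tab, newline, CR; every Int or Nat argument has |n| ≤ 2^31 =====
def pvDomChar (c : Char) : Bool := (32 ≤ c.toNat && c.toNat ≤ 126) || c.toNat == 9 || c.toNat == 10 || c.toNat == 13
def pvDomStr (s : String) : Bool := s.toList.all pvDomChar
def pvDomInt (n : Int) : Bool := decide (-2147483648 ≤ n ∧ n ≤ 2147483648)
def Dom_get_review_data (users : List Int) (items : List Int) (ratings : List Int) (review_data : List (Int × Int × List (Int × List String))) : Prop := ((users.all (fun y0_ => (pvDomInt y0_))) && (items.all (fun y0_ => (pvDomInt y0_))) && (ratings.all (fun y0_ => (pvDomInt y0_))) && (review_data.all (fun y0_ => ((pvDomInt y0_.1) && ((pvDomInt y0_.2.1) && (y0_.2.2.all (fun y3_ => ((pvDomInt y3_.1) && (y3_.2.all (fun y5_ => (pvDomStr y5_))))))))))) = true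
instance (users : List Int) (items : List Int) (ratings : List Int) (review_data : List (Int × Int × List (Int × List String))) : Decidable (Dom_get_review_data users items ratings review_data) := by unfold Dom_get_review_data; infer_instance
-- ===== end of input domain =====

-- ===== PORT A =====
-- B solves the same flattening by divide-and-conquer on the zipped triples instead of A's
-- single pass with five parallel appends (objective: alternative decomposition).
-- review_data is a Python dict keyed by (user,item): ported as an association list, lookup = first match.
def pvLookup (review_data : List (Int × Int × List (Int × List String))) (u i : Int) :
    Option (List (Int × List String)) :=
  match review_data.find? (fun e => e.1 == u && e.2.1 == i) with
  | some e => some e.2.2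
  | none => none

def get_review_data (users : List Int) (items : List Int) (ratings : List Int) (review_data : List (Int × Int × List (Int × List String))) : List Int × List Int × List Int × List Int × List (List String) :=
  -- for user,item,rating in zip(...): for photo_id,reviews in review_data[(user,item)]: five appends
  (users.zip (items.zip ratings)).foldl
    (fun (acc : List Int × List Int × List Int × List Int × List (List String)) t =>
      match pvLookup review_data t.1 t.2.1 with
      | some rs => rs.foldl
          (fun acc pr =>
            (acc.1 ++ [t.1], acc.2.1 ++ [t.2.1], acc.2.2.1 ++ [t.2.2],
             acc.2.2.2.1 ++ [pr.1], acc.2.2.2.2 ++ [pr.2])) acc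
      | none => acc)  -- Python raises KeyError here; excluded by Pre_
    ([], [], [], [], [])

-- ===== PORT B =====
-- solve(ts): divide and conquer over the list of triples (Source B's inner function)
def pvSolve (review_data : List (Int × Int × List (Int × List String))) :
    List (Int × Int × Int) → List Int × List Int × List Int × List Int × List (List String)
  | [] => ([], [], [], [], [])
  | [t] =>
      match pvLookup review_data t.1 t.2.1 with
      | some block =>
          (List.replicate block.length t.1, List.replicate block.length t.2.1,
           List.replicate block.length t.2.2, block.map (·.1), block.map (·.2))
      | none => ([], [], [], [], [])  -- Python raises KeyError here; excluded by Pre_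
  | t1 :: t2 :: ts =>
      let full := t1 :: t2 :: ts
      let mid := full.length / 2
      let a := pvSolve review_data (full.take mid)
      let b := pvSolve review_data (full.drop mid)
      (a.1 ++ b.1, a.2.1 ++ b.2.1, a.2.2.1 ++ b.2.2.1,
       a.2.2.2.1 ++ b.2.2.2.1, a.2.2.2.2 ++ b.2.2.2.2)
termination_by ts => ts.length
decreasing_by
  · simp only [List.length_take]; simp; omega
  · simp only [List.length_drop]; simp; omega

def get_review_data_alt (users : List Int) (items : List Int) (ratings : List Int) (review_data : List (Int × Int × List (Int × List String))) : List Int × List Int × List Int × List Int × List (List String) :=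
  pvSolve review_data (users.zip (items.zip ratings))

-- ===== PRECONDITION & SPEC =====
-- Pre_: every zipped (user,item) pair is a key of review_data (otherwise Python A raises KeyError).
def Pre_get_review_data (users : List Int) (items : List Int) (ratings : List Int) (review_data : List (Int × Int × List (Int × List String))) : Prop :=
  ∀ t ∈ users.zip (items.zip ratings), (pvLookup review_data t.1 t.2.1).isSome
instance (users : List Int) (items : List Int) (ratings : List Int) (review_data : List (Int × Int × List (Int × List String))) : Decidable (Pre_get_review_data users items ratings review_data) := by unfold Pre_get_review_data; infer_instance

def pvWitness_get_review_data : List Int × List Int × List Int × (List (Int × Int × List (Int × List String))) :=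
  ([1, 3], [2, 4], [5, 6], [(1, 2, [(10, ["ok"]), (11, [])]), (3, 4, [])])

def Spec_get_review_data (users : List Int) (items : List Int) (ratings : List Int) (review_data : List (Int × Int × List (Int × List String))) (out : List Int × List Int × List Int × List Int × List (List String)) : Prop := out = get_review_data_alt users items ratings review_data
instance (users : List Int) (items : List Int) (ratings : List Int) (review_data : List (Int × Int × List (Int × List String))) (out : List Int × List Int × List Int × List Int × List (List String)) : Decidable (Spec_get_review_data users items ratings review_data out) := by unfold Spec_get_review_data; infer_instance

-- ===== CLAIM (what is proved, stated in full; the proofs are below) =====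
def Claim_equal_get_review_data : Prop := ∀ (users : List Int) (items : List Int) (ratings : List Int) (review_data : List (Int × Int × List (Int × List String))), Dom_get_review_data users items ratings review_data → Pre_get_review_data users items ratings review_data → Spec_get_review_data users items ratings review_data (get_review_data users items ratings review_data)

-- ===== LEMMAS AND PROOFS =====
-- Per-triple expansion: the rows a triple contributes (empty where the key is absent).
def pvRow (review_data : List (Int × Int × List (Int × List String)))
    (t : Int × Int × Int) : List (Int × Int × Int × Int × List String) :=
  match pvLookup review_data t.1 t.2.1 with
  | some rs => rs.map (fun pr => (t.1, t.2.1, t.2.2, pr.1, pr.2))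
  | none => []

-- The five column projections of a rows list.
def pvCols (R : List (Int × Int × Int × Int × List String)) :
    List Int × List Int × List Int × List Int × List (List String) :=
  (R.map (·.1), R.map (·.2.1), R.map (·.2.2.1), R.map (·.2.2.2.1), R.map (·.2.2.2.2))

theorem pvCols_append (X Y : List (Int × Int × Int × Int × List String)) :
    pvCols (X ++ Y) =
      ((pvCols X).1 ++ (pvCols Y).1, (pvCols X).2.1 ++ (pvCols Y).2.1,
       (pvCols X).2.2.1 ++ (pvCols Y).2.2.1, (pvCols X).2.2.2.1 ++ (pvCols Y).2.2.2.1,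
       (pvCols X).2.2.2.2 ++ (pvCols Y).2.2.2.2) := by
  simp [pvCols]

-- Inner loop of A, started at the columns of R, yields the columns of R extended by the triple's rows.
theorem pv_inner (u i r : Int) (rs : List (Int × List String))
    (R : List (Int × Int × Int × Int × List String)) :
    rs.foldl
      (fun (acc : List Int × List Int × List Int × List Int × List (List String)) pr =>
        (acc.1 ++ [u], acc.2.1 ++ [i], acc.2.2.1 ++ [r],
         acc.2.2.2.1 ++ [pr.1], acc.2.2.2.2 ++ [pr.2])) (pvCols R)
      = pvCols (R ++ rs.map (fun pr => (u, i, r, pr.1, pr.2))) := by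
  induction rs generalizing R with
  | nil => simp
  | cons hd tl ih =>
    simp only [List.foldl_cons, List.map_cons]
    have : (((pvCols R).1 ++ [u], (pvCols R).2.1 ++ [i], (pvCols R).2.2.1 ++ [r],
             (pvCols R).2.2.2.1 ++ [hd.1], (pvCols R).2.2.2.2 ++ [hd.2]))
         = pvCols (R ++ [(u, i, r, hd.1, hd.2)]) := by
      simp [pvCols]
    rw [this, ih]
    simp

-- A's outer loop started at the columns of R equals the columns of R ++ flatMap of per-triple rows.
theorem pv_outer (ts : List (Int × Int × Int))
    (review_data : List (Int × Int × List (Int × List String)))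
    (R : List (Int × Int × Int × Int × List String)) :
    ts.foldl
      (fun (acc : List Int × List Int × List Int × List Int × List (List String)) t =>
        match pvLookup review_data t.1 t.2.1 with
        | some rs => rs.foldl
            (fun acc pr =>
              (acc.1 ++ [t.1], acc.2.1 ++ [t.2.1], acc.2.2.1 ++ [t.2.2],
               acc.2.2.2.1 ++ [pr.1], acc.2.2.2.2 ++ [pr.2])) acc
        | none => acc) (pvCols R)
      = pvCols (R ++ ts.flatMap (pvRow review_data)) := by
  induction ts generalizing R with
  | nil => simp
  | cons hd tl ih =>
    simp only [List.foldl_cons, List.flatMap_cons]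
    cases h : pvLookup review_data hd.1 hd.2.1 with
    | none =>
      rw [ih]
      simp [pvRow, h]
    | some rs =>
      simp only [pv_inner]
      rw [ih]
      simp [pvRow, h]

-- B's divide-and-conquer computes the columns of the flatMap of per-triple rows.
theorem pv_solve_eq (review_data : List (Int × Int × List (Int × List String)))
    (ts : List (Int × Int × Int)) :
    pvSolve review_data ts = pvCols (ts.flatMap (pvRow review_data)) := by
  induction ts using pvSolve.induct review_data with
  | case1 => simp [pvSolve, pvCols]
  | case2 t block h =>
    simp [pvSolve, h, pvRow, pvCols, Function.comp_def, List.map_const']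
  | case3 t h =>
    simp [pvSolve, h, pvRow, pvCols]
  | case4 t1 t2 ts full mid iha ihb =>
    rw [pvSolve, iha, ihb]
    have hsplit : (t1 :: t2 :: ts) =
        (t1 :: t2 :: ts).take ((t1 :: t2 :: ts).length / 2) ++
        (t1 :: t2 :: ts).drop ((t1 :: t2 :: ts).length / 2) := by
      simp
    conv_rhs => rw [hsplit]
    rw [List.flatMap_append, pvCols_append]

-- ===== VERDICT (by name: the statement is the Claim_ definition above) =====
theorem get_review_data_spec : Claim_equal_get_review_data := by
  intro users items ratings review_data _ _
  unfold Spec_get_review_data get_review_data get_review_data_alt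
  have h := pv_outer (users.zip (items.zip ratings)) review_data []
  simp only [pvCols, List.map_nil, List.nil_append] at h
  rw [h, pv_solve_eq]
  rfl
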